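-- pv_equiv track=rewrite | github.com/facebookresearch/side | projects/verify_wikipedia/scripts/create_datasets/create_reranker_train_data.py | interleave_rankings
-- ===== SOURCE A (Python) =====
-- def interleave_rankings(rankings):
--     result = list()
--     max_len = max(len(rankings["dpr"]), len(rankings["bm25"]))
--     for i in range(max_len):
--         if i < len(rankings["dpr"]):
--             result.append(rankings["dpr"][i])
--         if i < len(rankings["bm25"]):
--             result.append(rankings["bm25"][i])
--     return result
-- ===== SOURCE B (Python) =====
-- def interleave_rankings(rankings):
--     tagged = [(i, 0, v) for i, v in enumerate(rankings["dpr"])]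
--     tagged += [(i, 1, v) for i, v in enumerate(rankings["bm25"])]
--     tagged.sort(key=lambda t: (t[0], t[1]))
--     return [t[2] for t in tagged]
-- ===== Notes on version B (the rewrite author's own statement) =====
-- stated objective: alternative
-- what changed: Replaces A's max-length index loop with per-index bounds checks by a tag-and-sort schedule: each entry is tagged with (position, source-priority), the tags are sorted lexicographically, and the values are projected out.
import Mathlib
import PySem

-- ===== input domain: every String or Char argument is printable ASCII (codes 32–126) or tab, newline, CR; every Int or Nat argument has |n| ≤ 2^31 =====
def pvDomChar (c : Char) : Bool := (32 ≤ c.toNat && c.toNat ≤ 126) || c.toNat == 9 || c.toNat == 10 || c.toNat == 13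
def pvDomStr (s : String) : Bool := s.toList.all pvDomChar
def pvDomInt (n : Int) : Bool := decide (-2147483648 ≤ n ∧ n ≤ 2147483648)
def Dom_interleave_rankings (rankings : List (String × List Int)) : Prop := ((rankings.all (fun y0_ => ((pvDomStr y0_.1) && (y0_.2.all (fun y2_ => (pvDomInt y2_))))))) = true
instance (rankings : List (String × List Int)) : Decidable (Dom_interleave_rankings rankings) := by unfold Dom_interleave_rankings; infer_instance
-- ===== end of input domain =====

-- B replaces A's max-length index loop by a tag-and-sort schedule: tag each entry with
-- (position, source-priority), sort lexicographically, project the values; alternative, same result.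

-- ===== PORT A =====
-- literal port: look up the two lists, loop i over range(max_len), append under bounds checks
def interleave_rankings (rankings : List (String × List Int)) : List Int :=
  let dpr := (PySem.Dict.get? (PySem.Dict.mk rankings) "dpr").getD []
  let bm25 := (PySem.Dict.get? (PySem.Dict.mk rankings) "bm25").getD []
  let maxLen : Int := max (dpr.length : Int) (bm25.length : Int)
  (PySem.List.pyRange 0 maxLen 1).foldl
    (fun result i =>
      let result := if i < (dpr.length : Int) then result ++ [PySem.List.pyGetD dpr i 0] else result
      if i < (bm25.length : Int) then result ++ [PySem.List.pyGetD bm25 i 0] else result)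
    []

-- ===== PORT B =====
-- port of Source B: build the tagged list (position, source-priority, value) from both
-- enumerations, Python-sort it with the tuple key (t[0], t[1]), project out t[2]
def interleave_rankings_alt (rankings : List (String × List Int)) : List Int :=
  let tagged : List (Int × Int × Int) :=
    (PySem.List.enumerate ((PySem.Dict.get? (PySem.Dict.mk rankings) "dpr").getD []) 0).map
      (fun p => (p.1, (0 : Int), p.2))
    ++ (PySem.List.enumerate ((PySem.Dict.get? (PySem.Dict.mk rankings) "bm25").getD []) 0).map
      (fun p => (p.1, (1 : Int), p.2))
  (PySem.List.sorted2 tagged (fun t => t.1) (fun t => t.2.1) false).map (fun t => t.2.2)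

-- ===== PRECONDITION & SPEC =====
-- A (and B) raise KeyError unless the dict has both keys "dpr" and "bm25"; Pre_ requires them.
def Pre_interleave_rankings (rankings : List (String × List Int)) : Prop :=
  (PySem.Dict.get? (PySem.Dict.mk rankings) "dpr").isSome ∧ (PySem.Dict.get? (PySem.Dict.mk rankings) "bm25").isSome
instance (rankings : List (String × List Int)) : Decidable (Pre_interleave_rankings rankings) := by
  unfold Pre_interleave_rankings; infer_instance

def pvWitness_interleave_rankings : (List (String × List Int)) :=
  [("dpr", [1, 2, 3]), ("bm25", [4, 5])]

def Spec_interleave_rankings (rankings : List (String × List Int)) (out : List Int) : Prop := out = interleave_rankings_alt rankings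
instance (rankings : List (String × List Int)) (out : List Int) : Decidable (Spec_interleave_rankings rankings out) := by unfold Spec_interleave_rankings; infer_instance

-- ===== CLAIM (what is proved, stated in full; the proofs are below) =====
def Claim_equal_interleave_rankings : Prop := ∀ (rankings : List (String × List Int)), Dom_interleave_rankings rankings → Pre_interleave_rankings rankings → Spec_interleave_rankings rankings (interleave_rankings rankings)

-- ===== LEMMAS AND PROOFS =====

-- proof-side description of the common result: the tagged interleaving schedule from position k
def zipTag (k : Int) : List Int → List Int → List (Int × Int × Int)
  | [], [] => []
  | [], b :: bs => (k, 1, b) :: zipTag (k + 1) [] bs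
  | d :: ds, [] => (k, 0, d) :: zipTag (k + 1) ds []
  | d :: ds, b :: bs => (k, 0, d) :: (k, 1, b) :: zipTag (k + 1) ds bs

-- A's interleaving, as a plain parallel recursion (proof-side)
def interleaveZip : List Int → List Int → List Int
  | [], [] => []
  | [], b :: bs => b :: interleaveZip [] bs
  | d :: ds, [] => d :: interleaveZip ds []
  | d :: ds, b :: bs => d :: b :: interleaveZip ds bs

theorem map_zipTag (k : Int) (d b : List Int) :
    (zipTag k d b).map (fun t => t.2.2) = interleaveZip d b := by
  induction d generalizing k b with
  | nil =>
    induction b generalizing k with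
    | nil => simp [zipTag, interleaveZip]
    | cons y bs ih => simp [zipTag, interleaveZip, ih]
  | cons x ds ih =>
    cases b with
    | nil => simp [zipTag, interleaveZip, ih]
    | cons y bs => simp [zipTag, interleaveZip, ih]

theorem zipTag_perm (k : Int) (d b : List Int) :
    (zipTag k d b).Perm
      ((PySem.List.enumerate d k).map (fun p => (p.1, (0 : Int), p.2))
        ++ (PySem.List.enumerate b k).map (fun p => (p.1, (1 : Int), p.2))) := by
  induction d generalizing k b with
  | nil =>
    induction b generalizing k with
    | nil => simp [zipTag, PySem.List.enumerate]
    | cons y bs ih =>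
      simp only [zipTag, List.map_cons, List.map_nil, List.nil_append, PySem.List.enumerate]
      exact (ih (k + 1)).cons _
  | cons x ds ih =>
    cases b with
    | nil =>
      simp only [zipTag, List.map_cons, List.map_nil, List.append_nil, PySem.List.enumerate]
      have := ih (k + 1) []
      simp only [PySem.List.enumerate, List.map_nil, List.append_nil] at this
      exact this.cons _
    | cons y bs =>
      simp only [zipTag, PySem.List.enumerate_cons, List.map_cons]
      refine List.Perm.cons _ ?_
      exact ((ih (k + 1) bs).cons _).trans List.perm_middle.symm

-- lower bound on positions in the schedule
theorem zipTag_pos_lb (k : Int) (d b : List Int) :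
    ∀ t ∈ zipTag k d b, k ≤ t.1 := by
  induction d generalizing k b with
  | nil =>
    induction b generalizing k with
    | nil => simp [zipTag]
    | cons y bs ih =>
      intro t ht
      simp only [zipTag, List.mem_cons] at ht
      rcases ht with rfl | ht
      · simp
      · have := ih (k + 1) t ht; omega
  | cons x ds ih =>
    cases b with
    | nil =>
      intro t ht
      simp only [zipTag, List.mem_cons] at ht
      rcases ht with rfl | ht
      · simp
      · have := ih (k + 1) [] t ht; omega
    | cons y bs =>
      intro t ht
      simp only [zipTag, List.mem_cons] at ht
      rcases ht with rfl | rfl | ht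
      · simp
      · simp
      · have := ih (k + 1) bs t ht; omega

-- the schedule's keys (position, source) are strictly increasing lexicographically
theorem zipTag_pairwise (k : Int) (d b : List Int) :
    List.Pairwise (fun a b_ => (toLex (a.1, a.2.1) : Int ×ₗ Int) < toLex (b_.1, b_.2.1))
      (zipTag k d b) := by
  induction d generalizing k b with
  | nil =>
    induction b generalizing k with
    | nil => simp [zipTag]
    | cons y bs ih =>
      simp only [zipTag]
      refine List.Pairwise.cons ?_ (ih (k + 1))
      intro t ht
      have := zipTag_pos_lb (k + 1) [] bs t ht
      exact Prod.Lex.toLex_lt_toLex.mpr (Or.inl (by omega))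
  | cons x ds ih =>
    cases b with
    | nil =>
      simp only [zipTag]
      refine List.Pairwise.cons ?_ (ih (k + 1) [])
      intro t ht
      have := zipTag_pos_lb (k + 1) ds [] t ht
      exact Prod.Lex.toLex_lt_toLex.mpr (Or.inl (by omega))
    | cons y bs =>
      simp only [zipTag]
      refine List.Pairwise.cons ?_ (List.Pairwise.cons ?_ (ih (k + 1) bs))
      · intro t ht
        simp only [List.mem_cons] at ht
        rcases ht with rfl | ht
        · exact Prod.Lex.toLex_lt_toLex.mpr (Or.inr ⟨rfl, by norm_num⟩)
        · have := zipTag_pos_lb (k + 1) ds bs t ht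
          exact Prod.Lex.toLex_lt_toLex.mpr (Or.inl (by omega))
      · intro t ht
        have := zipTag_pos_lb (k + 1) ds bs t ht
        exact Prod.Lex.toLex_lt_toLex.mpr (Or.inl (by omega))

-- Python's tuple key (k1, k2) is the lexicographic order: sorted2 is sorted with a lex key
theorem sorted2_eq_sorted_lex (xs : List (Int × Int × Int)) :
    PySem.List.sorted2 xs (fun t => t.1) (fun t => t.2.1) false
      = PySem.List.sorted xs (fun t => (toLex (t.1, t.2.1) : Int ×ₗ Int)) false := by
  simp only [PySem.List.sorted2, PySem.List.sorted]
  have hlt : (fun (a b : Int × Int × Int) =>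
        decide (a.1 < b.1) || (!decide (b.1 < a.1) && decide (a.2.1 < b.2.1)))
      = (fun (a b : Int × Int × Int) =>
        decide ((toLex (a.1, a.2.1) : Int ×ₗ Int) < toLex (b.1, b.2.1))) := by
    funext a b
    by_cases h1 : a.1 < b.1 <;> by_cases h2 : b.1 < a.1 <;> by_cases h3 : a.2.1 < b.2.1 <;>
      simp [Prod.Lex.toLex_lt_toLex, h1, h2, h3] <;> omega
  rw [hlt]
  simp

-- A's loop: folding the body over the indices from k appends the interleaving of the suffixes at k
theorem interleave_loop (d b : List Int) (k : Nat) (acc : List Int) :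
    (PySem.List.pyRange (k : Int) (max (d.length : Int) (b.length : Int)) 1).foldl
      (fun result i =>
        let result := if i < (d.length : Int) then result ++ [PySem.List.pyGetD d i 0] else result
        if i < (b.length : Int) then result ++ [PySem.List.pyGetD b i 0] else result)
      acc
    = acc ++ interleaveZip (d.drop k) (b.drop k) := by
  by_cases h : (max (d.length : Int) (b.length : Int)) ≤ (k : Int)
  · rw [PySem.List.pyRange_one_eq_nil h]
    have hd : d.drop k = [] := List.drop_eq_nil_of_le (by omega)
    have hb : b.drop k = [] := List.drop_eq_nil_of_le (by omega)
    simp [hd, hb, interleaveZip]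
  · push Not at h
    rw [PySem.List.pyRange_one_cons h]
    have step := interleave_loop d b (k + 1)
    rcases Nat.lt_or_ge k d.length with hd | hd
    · have hdg : d.drop k = d[k] :: d.drop (k + 1) := List.drop_eq_getElem_cons hd
      rcases Nat.lt_or_ge k b.length with hb | hb
      · have hbg : b.drop k = b[k] :: b.drop (k + 1) := List.drop_eq_getElem_cons hb
        simp only [List.foldl_cons]
        rw [if_pos (show ((k:Int)) < (b.length:Int) by exact_mod_cast hb), if_pos (show ((k:Int)) < (d.length:Int) by exact_mod_cast hd)]
        rw [show ((k : Int) + 1) = ((k + 1 : Nat) : Int) by push_cast; ring, step]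
        rw [PySem.List.pyGetD_natCast, PySem.List.pyGetD_natCast, hdg, hbg,
          List.getD_eq_getElem _ _ hd, List.getD_eq_getElem _ _ hb]
        simp only [interleaveZip]; simp
      · have hbg : b.drop k = [] := List.drop_eq_nil_of_le hb
        have hbg' : b.drop (k + 1) = [] := List.drop_eq_nil_of_le (by omega)
        simp only [List.foldl_cons]
        rw [if_neg (show ¬ ((k:Int)) < (b.length:Int) by exact_mod_cast Nat.not_lt.mpr hb), if_pos (show ((k:Int)) < (d.length:Int) by exact_mod_cast hd)]
        rw [show ((k : Int) + 1) = ((k + 1 : Nat) : Int) by push_cast; ring, step]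
        rw [PySem.List.pyGetD_natCast, hdg, List.getD_eq_getElem _ _ hd]
        rw [hbg]
        simp only [hbg', interleaveZip, List.append_assoc, List.singleton_append]
    · have hb : k < b.length := by omega
      have hdg : d.drop k = [] := List.drop_eq_nil_of_le hd
      have hdg' : d.drop (k + 1) = [] := List.drop_eq_nil_of_le (by omega)
      have hbg : b.drop k = b[k] :: b.drop (k + 1) := List.drop_eq_getElem_cons hb
      simp only [List.foldl_cons]
      rw [if_pos (show ((k:Int)) < (b.length:Int) by exact_mod_cast hb), if_neg (show ¬ ((k:Int)) < (d.length:Int) by exact_mod_cast Nat.not_lt.mpr hd)]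
      rw [show ((k : Int) + 1) = ((k + 1 : Nat) : Int) by push_cast; ring, step]
      rw [PySem.List.pyGetD_natCast, hbg, List.getD_eq_getElem _ _ hb]
      simp only [hdg, hdg', interleaveZip]; simp
termination_by (max d.length b.length) - k
decreasing_by omega

-- B's sort produces exactly the schedule zipTag 0 d b
theorem sorted_tagged_eq (d b : List Int) :
    PySem.List.sorted2
      ((PySem.List.enumerate d 0).map (fun p => (p.1, (0 : Int), p.2))
        ++ (PySem.List.enumerate b 0).map (fun p => (p.1, (1 : Int), p.2)))
      (fun t => t.1) (fun t => t.2.1) false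
    = zipTag 0 d b := by
  rw [sorted2_eq_sorted_lex]
  exact PySem.List.sorted_eq_of_perm_of_pairwise_lt _ _ _ (zipTag_perm 0 d b) (zipTag_pairwise 0 d b)

-- ===== VERDICT (by name: the statement is the Claim_ definition above) =====
theorem interleave_rankings_spec : Claim_equal_interleave_rankings := by
  intro rankings _ _
  unfold Spec_interleave_rankings interleave_rankings interleave_rankings_alt
  dsimp only
  rw [sorted_tagged_eq, map_zipTag]
  have := interleave_loop ((PySem.Dict.get? (PySem.Dict.mk rankings) "dpr").getD [])
    ((PySem.Dict.get? (PySem.Dict.mk rankings) "bm25").getD []) 0 []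
  simpa using this
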